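-- pv_equiv track=rewrite | github.com/shi0rik0/zml-python | temp.py | string_literal
-- ===== SOURCE A (Python) =====
-- escaping = {
--     't': '\t',
--     'n': '\n',
--     'b': '\b',
--     '"': '"',
--     '\\': '\\',
-- }
--
-- def string_literal(s: str) -> str:
--     if s[0] == '"':
--         builder = []
--         i = 1
--         while True:
--             j = s.find('\\', i)
--             if j == -1:
--                 builder.append(s[i:-1])
--                 break
--             builder.append(s[i:j])
--             builder.append(escaping[s[j+1]])
--             i = j + 2
--         return ''.join(builder)
--     elif s[0] == '`':
--         return s[1:-1]
--     else:
--         raise RuntimeError()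
-- ===== SOURCE B (Python) =====
-- escaping = {
--     't': '\t',
--     'n': '\n',
--     'b': '\b',
--     '"': '"',
--     '\\': '\\',
-- }
--
-- def string_literal(s: str) -> str:
--     c = s[0]
--     if c == '"':
--         out = []
--         i = 1
--         n = len(s) - 1
--         while i < n:
--             ch = s[i]
--             if ch == '\\':
--                 out.append(escaping[s[i + 1]])
--                 i += 2
--             else:
--                 out.append(ch)
--                 i += 1
--         return ''.join(out)
--     if c == '`':
--         return s[1:-1]
--     raise RuntimeError()
-- ===== Notes on version B (the rewrite author's own statement) =====
-- stated objective: alternative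
-- what changed: B replaces A's repeated s.find('\\', i) jumps with slice-and-join chunking by a single explicit char-by-char index scan over s[1:-1] with eager escape lookahead, appending one character per step.
-- outside the precondition, e.g. on string_literal('\\'): A raises RuntimeError, B raises RuntimeError; on string_literal(''): A raises IndexError, B raises IndexError
import Mathlib
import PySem

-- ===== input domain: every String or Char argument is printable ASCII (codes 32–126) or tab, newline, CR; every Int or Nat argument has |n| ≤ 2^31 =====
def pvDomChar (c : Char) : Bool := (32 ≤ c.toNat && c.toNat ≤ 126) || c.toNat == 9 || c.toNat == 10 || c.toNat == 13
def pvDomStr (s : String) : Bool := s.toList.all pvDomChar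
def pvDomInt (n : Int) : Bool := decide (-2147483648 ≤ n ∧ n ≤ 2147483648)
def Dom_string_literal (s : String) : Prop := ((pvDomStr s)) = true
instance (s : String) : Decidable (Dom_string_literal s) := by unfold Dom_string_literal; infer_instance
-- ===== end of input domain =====

-- B replaces A's find/slice chunking by a single explicit char-by-char scan with eager
-- escape lookahead (objective: alternative decomposition, same cost).

-- the module-level 'escaping' dict, shared by both programs
def escaping : PySem.Dict Char Char :=
  PySem.Dict.ofList [('t', '\t'), ('n', '\n'), ('b', '\x08'), ('"', '"'), ('\\', '\\')]

-- used by loopA's termination proof: s.find('\\', i) with a start past the end is -1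
theorem findFrom_past_len (l : List Char) (i : Nat) (hi : l.length < i) :
    PySem.Chars.findFrom l ['\\'] (i : Int) none = -1 := by
  simp only [PySem.Chars.findFrom]
  have h0 : ¬ ((i : Int) < 0) := by omega
  have h1 : (l.length : Int) < (i : Int) := by omega
  simp only [if_neg h0]
  rw [if_pos h1]

-- ===== PORT A =====
-- the 'while True' loop: builder is the appended result; none = the Python raised
-- (IndexError on s[j+1] past the end, KeyError on an unknown escape)
def loopA (l : List Char) (i : Nat) : Option (List Char) :=
  let j : Int := PySem.Chars.findFrom l ['\\'] (i : Int) none   -- j = s.find('\\', i)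
  if _hne : j = -1 then
    some (PySem.List.slice l (some (i : Int)) (some (-1)))      -- builder.append(s[i:-1]); break
  else
    match PySem.List.pyGet? l (j + 1) with                      -- s[j+1]
    | none => none
    | some c =>
      match PySem.Dict.get? escaping c with                     -- escaping[s[j+1]]
      | none => none
      | some e =>
        (fun r => PySem.List.slice l (some (i : Int)) (some j) ++ e :: r) <$> loopA l (j.toNat + 2)
termination_by l.length + 1 - i
decreasing_by
  have hk : i ≤ l.length := by
    by_contra hi
    exact _hne (findFrom_past_len l i (by omega))
  obtain ⟨h1, h2, -⟩ := PySem.Chars.findFrom_natCast_spec l ['\\'] i hk _hne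
  have hlt : (PySem.Chars.findFrom l ['\\'] (i : Int) none).toNat < l.length := by
    rcases h2 with ⟨t, ht⟩
    have := congrArg List.length ht
    simp [List.length_drop] at this
    omega
  omega

def string_literal (s : String) : String :=
  let l := s.toList
  match PySem.List.pyGet? l 0 with                              -- s[0]; none = IndexError on ""
  | none => ""
  | some c =>
    if c = '"' then
      match loopA l 1 with
      | some r => String.ofList r                               -- ''.join(builder)
      | none => ""                                              -- the loop raised (excluded by Pre_)
    else if c = '`' then
      String.ofList (PySem.List.slice l (some 1) (some (-1)))   -- s[1:-1]
    else
      ""                                                        -- raise RuntimeError() (excluded by Pre_)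

-- ===== PORT B =====
-- the 'while i < n' scan; none = the Python raised (KeyError / IndexError)
def loopB (l : List Char) (i n : Nat) : Option (List Char) :=
  if i < n then
    match l[i]? with                                            -- ch = s[i]  (always in range here)
    | none => none
    | some ch =>
      if ch = '\\' then
        match l[i + 1]? with                                    -- s[i+1]
        | none => none
        | some c =>
          match PySem.Dict.get? escaping c with                 -- escaping[s[i+1]]
          | none => none
          | some e => (fun r => e :: r) <$> loopB l (i + 2) n
      else
        (fun r => ch :: r) <$> loopB l (i + 1) n
  else
    some []
termination_by n - i

def string_literal_alt (s : String) : String :=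
  let l := s.toList
  match PySem.List.pyGet? l 0 with                              -- c = s[0]
  | none => ""
  | some c =>
    if c = '"' then
      match loopB l 1 (l.length - 1) with
      | some r => String.ofList r                               -- ''.join(out)
      | none => ""
    else if c = '`' then
      String.ofList (PySem.List.slice l (some 1) (some (-1)))   -- s[1:-1]
    else
      ""

-- ===== PRECONDITION & SPEC =====
-- escOK checks the escape grammar of the quoted body: every backslash is followed by a
-- character that is a key of 'escaping'
def escOK : List Char → Bool
  | [] => true
  | [x] => !(x == '\\')
  | x :: c :: rest =>
    if x = '\\' then (PySem.Dict.get? escaping c).isSome && escOK rest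
    else escOK (c :: rest)

-- Pre_ excludes exactly the inputs on which A raises: the empty string (IndexError on s[0]),
-- a first character that is neither '"' nor '`' (RuntimeError), and, for '"'-strings, an
-- unknown escape character (KeyError) or a backslash at the very last position (IndexError on s[j+1]).
def Pre_string_literal (s : String) : Prop :=
  s.toList ≠ [] ∧
    (s.toList.headI = '`' ∨ (s.toList.headI = '"' ∧ escOK s.toList.tail = true))
instance (s : String) : Decidable (Pre_string_literal s) := by
  unfold Pre_string_literal; infer_instance

def pvWitness_string_literal : String := "\"a\\nb\""

def Spec_string_literal (s : String) (out : String) : Prop := out = string_literal_alt s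
instance (s : String) (out : String) : Decidable (Spec_string_literal s out) := by
  unfold Spec_string_literal; infer_instance

-- ===== CLAIM (what is proved, stated in full; the proofs are below) =====
def Claim_equal_string_literal : Prop :=
  ∀ (s : String), Dom_string_literal s → Pre_string_literal s →
    Spec_string_literal s (string_literal s)

-- ===== LEMMAS AND PROOFS =====

theorem escOK_cons (x : Char) (xs : List Char) (hx : x ≠ '\\')
    (h : escOK (x :: xs) = true) : escOK xs = true := by
  cases xs with
  | nil => simp [escOK]
  | cons c rest => rw [escOK, if_neg hx] at h; exact h

-- stepping over a backslash-free prefix keeps escOK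
theorem escOK_drop (l : List Char) (d i : Nat)
    (hno : ∀ k, i ≤ k → k < i + d → l[k]? ≠ some '\\')
    (h : escOK (l.drop i) = true) : escOK (l.drop (i + d)) = true := by
  induction d generalizing i with
  | zero => simpa using h
  | succ d ih =>
    cases hcl : l.drop i with
    | nil =>
      have hlen : l.length ≤ i := List.drop_eq_nil_iff.mp hcl
      have : l.drop (i + (d + 1)) = [] := List.drop_eq_nil_iff.mpr (by omega)
      simp [this, escOK]
    | cons x xs =>
      have hget : l[i]? = some x := by
        have := congrArg (fun t => t[0]?) hcl
        simpa [List.getElem?_drop] using this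
      have hx : x ≠ '\\' := by
        intro hxeq
        exact hno i (le_refl _) (by omega) (by rw [hget, hxeq])
      have hxs : xs = l.drop (i + 1) := by
        have := congrArg List.tail hcl
        simpa [List.tail_drop] using this.symm
      have h1 : escOK (l.drop (i + 1)) = true := by
        rw [← hxs]; exact escOK_cons x xs hx (by rw [← hcl]; exact h)
      have := ih (i + 1) (fun k hk1 hk2 => hno k (by omega) (by omega)) h1
      rw [show i + 1 + d = i + (d + 1) by omega] at this
      exact this

-- loopB walks through a backslash-free stretch by collecting its characters
theorem loopB_skip (l : List Char) (d i : Nat) (hj : i + d ≤ l.length - 1)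
    (hno : ∀ k, i ≤ k → k < i + d → l[k]? ≠ some '\\') :
    loopB l i (l.length - 1)
      = (fun r => (l.take (i + d)).drop i ++ r) <$> loopB l (i + d) (l.length - 1) := by
  induction d generalizing i with
  | zero =>
    simp
  | succ d ih =>
    have hi : i < l.length - 1 := by omega
    have hil : i < l.length := by omega
    have hget : l[i]? = some l[i] := List.getElem?_eq_getElem hil
    have hx : l[i] ≠ '\\' := by
      intro hxeq
      exact hno i (le_refl _) (by omega) (by rw [hget, hxeq])
    rw [loopB, if_pos hi, hget]
    simp only [if_neg hx]
    rw [ih (i + 1) (by omega) (fun k hk1 hk2 => hno k (by omega) (by omega))]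
    have hpre : (l.take (i + (d + 1))).drop i = l[i] :: (l.take (i + (d + 1))).drop (i + 1) := by
      have hlt : i < (l.take (i + (d + 1))).length := by
        simp [List.length_take]; omega
      rw [List.drop_eq_getElem_cons hlt, List.getElem_take]
    rw [show i + 1 + d = i + (d + 1) by omega, hpre]
    cases loopB l (i + (d + 1)) (l.length - 1) <;> simp

-- with no backslash anywhere at positions ≥ i, loopB returns exactly s[i:-1]
theorem loopB_tail (l : List Char) (i : Nat)
    (hno : ∀ k, i ≤ k → l[k]? ≠ some '\\') :
    loopB l i (l.length - 1) = some (l.dropLast.drop i) := by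
  by_cases hi : i ≤ l.length - 1
  · rw [loopB_skip l (l.length - 1 - i) i (by omega)
      (fun k hk1 _ => hno k hk1)]
    rw [show i + (l.length - 1 - i) = l.length - 1 by omega]
    rw [loopB]
    simp [List.dropLast_eq_take]
  · rw [loopB, if_neg (by omega)]
    have : l.dropLast.drop i = [] :=
      List.drop_eq_nil_iff.mpr (by simp [List.length_dropLast]; omega)
    rw [this]

-- the slice s[i:-1] in list terms
theorem slice_to_neg_one' (l : List Char) (i : Nat) :
    PySem.List.slice l (some (i : Int)) (some (-1)) = l.dropLast.drop i := by
  simp [PySem.List.slice]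
  rw [List.dropLast_eq_take, List.drop_take]
  by_cases h : i ≤ l.length
  · rw [Nat.min_eq_left h]
  · have h1 : List.drop i l = [] := List.drop_eq_nil_iff.mpr (by omega)
    have h2 : List.drop l.length l = [] := by simp
    rw [Nat.min_eq_right (by omega), h1, h2]
    simp

theorem loop_main (l : List Char) (i : Nat) (hk : i ≤ l.length)
    (h : escOK (l.drop i) = true) :
    loopA l i = loopB l i (l.length - 1) := by
  rw [loopA]
  by_cases hne : PySem.Chars.findFrom l ['\\'] (i : Int) none = -1
  · rw [dif_pos hne]
    have hinf := (PySem.Chars.findFrom_natCast_eq_neg_one_iff l ['\\'] i hk).mp hne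
    have hno : ∀ k, i ≤ k → l[k]? ≠ some '\\' := by
      intro k hik hkv
      apply hinf
      have hmem : '\\' ∈ l.drop i := by
        have hg : (List.drop i l)[k - i]? = some '\\' := by
          rw [List.getElem?_drop, Nat.add_sub_cancel' hik]; exact hkv
        exact List.mem_of_getElem? hg
      obtain ⟨p, q, hpq⟩ := List.append_of_mem hmem
      exact ⟨p, q, by rw [hpq]; simp⟩
    rw [loopB_tail l i hno, slice_to_neg_one']
  · rw [dif_neg hne]
    obtain ⟨hij, hpre, hmin⟩ := PySem.Chars.findFrom_natCast_spec l ['\\'] i hk hne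
    set j := PySem.Chars.findFrom l ['\\'] (i : Int) none with hjdef
    have hj0 : (0 : Int) ≤ j := le_trans (by exact_mod_cast Int.natCast_nonneg i) hij
    set jn := j.toNat with hjn
    have hjcast : j = (jn : Int) := (Int.toNat_of_nonneg hj0).symm
    have hjl : jn < l.length := by
      obtain ⟨t, ht⟩ := hpre
      have := congrArg List.length ht
      simp [List.length_drop] at this
      omega
    have hijn : i ≤ jn := by
      rw [hjcast] at hij; exact_mod_cast hij
    have hgetj : l[jn]? = some '\\' := by
      obtain ⟨t, ht⟩ := hpre
      have := congrArg (fun xs => xs[0]?) ht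
      simpa [List.getElem?_drop] using this.symm
    have hno : ∀ k, i ≤ k → k < jn → l[k]? ≠ some '\\' := by
      intro k h1 h2 hkv
      apply hmin k h1 h2
      have hkl : k < l.length := by
        by_contra hc
        rw [List.getElem?_eq_none_iff.mpr (by omega)] at hkv
        simp at hkv
      have hval : l[k] = '\\' := by
        have := List.getElem?_eq_getElem hkl
        rw [this] at hkv; exact Option.some.inj hkv
      exact ⟨List.drop (k + 1) l, by rw [List.drop_eq_getElem_cons hkl, hval]; simp⟩
    have hesc2 : escOK (List.drop jn l) = true := by
      have := escOK_drop l (jn - i) i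
        (fun k hk1 hk2 => hno k hk1 (by omega)) h
      rwa [Nat.add_sub_cancel' hijn] at this
    have hdropjn : List.drop jn l = '\\' :: List.drop (jn + 1) l := by
      rw [List.drop_eq_getElem_cons hjl]
      have : l[jn] = '\\' := by
        have := List.getElem?_eq_getElem hjl
        rw [this] at hgetj; exact Option.some.inj hgetj
      rw [this]
    rw [hdropjn] at hesc2
    cases hd1 : List.drop (jn + 1) l with
    | nil =>
      rw [hd1] at hesc2
      simp [escOK] at hesc2
    | cons c rest2 =>
      rw [hd1] at hesc2
      have hesc3 : escOK ('\\' :: c :: rest2)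
          = ((PySem.Dict.get? escaping c).isSome && escOK rest2) := by
        rw [escOK, if_pos rfl]
      rw [hesc3, Bool.and_eq_true] at hesc2
      obtain ⟨hck, hrest⟩ := hesc2
      have hget1 : l[jn + 1]? = some c := by
        have := congrArg (fun xs => xs[0]?) hd1
        simpa [List.getElem?_drop] using this
      have hjn1 : jn + 1 < l.length := by
        by_contra hc
        rw [List.getElem?_eq_none_iff.mpr (by omega)] at hget1
        simp at hget1
      have hrest' : escOK (List.drop (jn + 2) l) = true := by
        have hdd : List.drop (jn + 2) l = rest2 := by
          have := congrArg List.tail hd1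
          simpa [List.tail_drop] using this
        rw [hdd]; exact hrest
      have hpg : PySem.List.pyGet? l (j + 1) = some c := by
        rw [hjcast, show ((jn : Int) + 1) = ((jn + 1 : Nat) : Int) by push_cast; ring]
        rw [PySem.List.pyGet?_natCast]
        exact hget1
      obtain ⟨e, he⟩ := Option.isSome_iff_exists.mp hck
      simp only [hpg, he]
      have hrec := loop_main l (jn + 2) (by omega) hrest'
      rw [hrec]
      rw [loopB_skip l (jn - i) i (by omega)
        (fun k hk1 hk2 => hno k hk1 (by omega))]
      rw [Nat.add_sub_cancel' hijn]
      have hstep : loopB l jn (l.length - 1)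
          = (fun r => e :: r) <$> loopB l (jn + 2) (l.length - 1) := by
        rw [loopB, if_pos (by omega)]
        simp [hgetj, hget1, he]
      rw [hstep]
      have hslice : PySem.List.slice l (some (i : Int)) (some j) = (l.take jn).drop i := by
        rw [hjcast, PySem.List.slice_natCast, List.drop_take]
      rw [hslice]
      cases loopB l (jn + 2) (l.length - 1) <;> simp
termination_by l.length - i
decreasing_by omega

-- ===== VERDICT (by name: the statement is the Claim_ definition above) =====
theorem string_literal_spec : Claim_equal_string_literal := by
  intro s _hdom hpre
  unfold Spec_string_literal string_literal string_literal_alt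
  obtain ⟨hne, hcase⟩ := hpre
  cases hl : s.toList with
  | nil => exact absurd hl hne
  | cons c rest =>
    simp only [PySem.List.pyGet?_zero_cons]
    rcases hcase with h | ⟨h1, h2⟩
    · rw [hl] at h
      simp only [List.headI] at h
      subst h
      simp
    · rw [hl] at h1 h2
      simp only [List.headI] at h1
      simp only [List.tail] at h2
      subst h1
      have := loop_main (('"' : Char) :: rest) 1 (by simp) (by simpa using h2)
      rw [this]
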